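-- pv_equiv track=rewrite | github.com/heyzbw/NLP_experiment | Exp1/main.py | transfer
-- ===== SOURCE A (Python) =====
-- def transfer(raw_sen):
--     count = 0
--     tmp_list = []
--     for ele in raw_sen.strip().split(' '):
--         _tmp_list = []
--         for _ in range(len(ele)):
--             _tmp_list.append(count)
--             count += 1
--         tmp_list.append(str(_tmp_list).replace(' ', ''))
--
--     return ' '.join(tmp_list)
-- ===== SOURCE B (Python) =====
-- def transfer(raw_sen):
--     out = ['[']
--     idx = 0
--     first = True
--     for ch in raw_sen.strip():
--         if ch == ' ':
--             out.append('] [')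
--             first = True
--         else:
--             if not first:
--                 out.append(',')
--             out.append(str(idx))
--             idx += 1
--             first = False
--     out.append(']')
--     return ''.join(out)
-- ===== Notes on version B (the rewrite author's own statement) =====
-- stated objective: alternative
-- what changed: B never splits the string into words and builds no index lists: it streams once over the stripped characters, emitting brackets/separators on spaces and the next counter digit-string on non-spaces, so A's nested word/char loops and the str(list).replace round-trip disappear.
import Mathlib
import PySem

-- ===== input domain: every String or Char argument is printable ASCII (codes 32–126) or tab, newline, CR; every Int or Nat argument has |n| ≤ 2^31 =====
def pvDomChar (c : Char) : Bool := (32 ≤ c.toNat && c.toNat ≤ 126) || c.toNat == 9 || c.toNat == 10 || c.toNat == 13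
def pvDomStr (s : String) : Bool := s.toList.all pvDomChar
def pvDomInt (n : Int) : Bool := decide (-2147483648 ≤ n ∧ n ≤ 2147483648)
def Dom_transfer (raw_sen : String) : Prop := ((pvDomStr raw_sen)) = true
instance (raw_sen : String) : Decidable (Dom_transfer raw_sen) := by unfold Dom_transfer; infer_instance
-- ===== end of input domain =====

-- B streams once over the stripped characters (no split into words, no index lists,
-- no str(list).replace round-trip), emitting the output text directly (objective: alternative).

-- ===== PORT A =====
-- hand-port of Python's str(list_of_ints): "[" + ", ".join(str(x) for x in xs) + "]" — exact for int lists
def pyStrIntList (xs : List Int) : List Char :=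
  '[' :: (PySem.Chars.join (", ".toList) (xs.map PySem.Int.toChars) ++ [']'])

def transferStepA (st : Int × List (List Char)) (ele : List Char) : Int × List (List Char) :=
  let inner := (List.range ele.length).foldl
      (fun (st2 : Int × List Int) _ => (st2.1 + 1, st2.2 ++ [st2.1])) (st.1, [])
  (inner.1, st.2 ++ [PySem.Chars.replace (pyStrIntList inner.2) " ".toList "".toList])

def transfer (raw_sen : String) : String :=
  let words := PySem.Chars.splitOn (PySem.Chars.strip raw_sen.toList) " ".toList
  String.ofList (PySem.Chars.join " ".toList (words.foldl transferStepA (0, [])).2)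

-- ===== PORT B =====
def transferStepB (st : Int × Bool × List Char) (ch : Char) : Int × Bool × List Char :=
  if ch = ' ' then (st.1, true, st.2.2 ++ "] [".toList)
  else (st.1 + 1, false,
        st.2.2 ++ (if st.2.1 then [] else [',']) ++ PySem.Int.toChars st.1)

def transfer_alt (raw_sen : String) : String :=
  String.ofList
    (((PySem.Chars.strip raw_sen.toList).foldl transferStepB (0, true, ['['])).2.2 ++ [']'])

-- ===== PRECONDITION & SPEC =====
def Spec_transfer (raw_sen : String) (out : String) : Prop := out = transfer_alt raw_sen
instance (raw_sen : String) (out : String) : Decidable (Spec_transfer raw_sen out) := by unfold Spec_transfer; infer_instance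

-- ===== CLAIM (what is proved, stated in full; the proofs are below) =====
def Claim_equal_transfer : Prop := ∀ (raw_sen : String), Dom_transfer raw_sen → Spec_transfer raw_sen (transfer raw_sen)

-- ===== LEMMAS AND PROOFS =====

-- recursive splitter on ' ' (proved equal to PySem.Chars.splitOn · [' '] below)
def sp : List Char → List (List Char)
  | [] => [[]]
  | c :: t => if c = ' ' then [] :: sp t else
      match sp t with
      | [] => [[c]]          -- unreachable: sp never returns []
      | w :: ws => (c :: w) :: ws

theorem sp_ne_nil (l : List Char) : sp l ≠ [] := by
  cases l with
  | nil => simp [sp]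
  | cons c t =>
      unfold sp
      split
      · simp
      · split <;> simp

def consHead (pre : List Char) : List (List Char) → List (List Char)
  | [] => [pre]
  | w :: ws => (pre ++ w) :: ws

theorem go_split (l : List Char) : ∀ (fuel : Nat) (cur : List Char) (acc : List (List Char)),
    l.length ≤ fuel →
    PySem.Chars.splitOn.go [' '] fuel l cur acc
      = acc.reverse ++ consHead cur.reverse (sp l) := by
  induction l with
  | nil =>
      intro fuel cur acc _
      cases fuel <;> simp [PySem.Chars.splitOn.go, sp, consHead]
  | cons c t ih =>
      intro fuel cur acc hle
      cases fuel with
      | zero => simp at hle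
      | succ f =>
          rw [PySem.Chars.splitOn.go]
          simp only [List.isPrefixOf, List.length_cons] at *
          by_cases hc : c = ' '
          · subst hc
            rw [if_pos (by simp)]
            simp only [List.length_cons, List.length_nil, List.drop_succ_cons, List.drop_zero]
            rw [ih f [] (cur.reverse :: acc) (by omega)]
            have := sp_ne_nil t
            cases hsp : sp t with
            | nil => exact absurd hsp this
            | cons w ws => simp [sp, hsp, consHead]
          · rw [if_neg (by simp; exact fun h => hc h.symm)]
            rw [ih f (c :: cur) acc (by omega)]
            have := sp_ne_nil t
            cases hsp : sp t with
            | nil => exact absurd hsp this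
            | cons w ws => simp [sp, hc, hsp, consHead]

theorem splitOn_eq_sp (l : List Char) :
    PySem.Chars.splitOn l [' '] = sp l := by
  unfold PySem.Chars.splitOn
  rw [go_split l (l.length + 1) [] [] (by omega)]
  have := sp_ne_nil l
  cases hsp : sp l with
  | nil => exact absurd hsp this
  | cons w ws => simp [consHead]

-- decimal digits of an Int never contain a space
theorem space_not_mem_toChars (n : Int) : ' ' ∉ PySem.Int.toChars n := by
  unfold PySem.Int.toChars
  split
  · intro h
    rcases List.mem_cons.mp h with h | h
    · exact absurd h (by decide)
    · have := Nat.isDigit_of_mem_toDigits (b := 10) (by norm_num) (by norm_num) h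
      exact absurd this (by decide)
  · intro h
    have := Nat.isDigit_of_mem_toDigits (b := 10) (by norm_num) (by norm_num) h
    exact absurd this (by decide)

-- replacing ' ' by '' is filtering the spaces out
theorem go_space (l : List Char) : ∀ (fuel : Nat) (acc : List Char), l.length ≤ fuel →
    PySem.Chars.replace.go [' '] [] fuel l acc
      = acc.reverse ++ l.filter (fun c => !(c == ' ')) := by
  induction l with
  | nil =>
      intro fuel acc _
      cases fuel <;> simp [PySem.Chars.replace.go]
  | cons c t ih =>
      intro fuel acc hle
      cases fuel with
      | zero => simp at hle
      | succ f =>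
          rw [PySem.Chars.replace.go]
          simp only [List.isPrefixOf, List.length_cons] at *
          by_cases hc : c = ' '
          · subst hc
            rw [if_pos (by simp)]
            simp only [List.length_nil, List.drop_succ_cons,
              List.drop_zero, List.reverse_nil, List.nil_append]
            rw [ih f acc (by omega)]
            simp
          · rw [if_neg (by simp; exact fun h => hc h.symm)]
            rw [ih f (c :: acc) (by omega)]
            simp [hc]

theorem replace_space (s : List Char) :
    PySem.Chars.replace s [' '] [] = s.filter (fun c => !(c == ' ')) := by
  unfold PySem.Chars.replace
  rw [if_neg (by decide)]
  simpa using go_space s s.length [] le_rfl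

-- removing spaces turns a ", "-join of space-free parts into a ","-join
theorem filter_join (parts : List (List Char)) (h : ∀ p ∈ parts, ' ' ∉ p) :
    (PySem.Chars.join (", ".toList) parts).filter (fun c => !(c == ' '))
      = PySem.Chars.join [','] parts := by
  induction parts with
  | nil => simp [PySem.Chars.join_nil]
  | cons p rest ih =>
      cases rest with
      | nil =>
          rw [PySem.Chars.join_singleton, PySem.Chars.join_singleton]
          rw [List.filter_eq_self.mpr]
          intro a ha
          simpa using fun hsp => h p (by simp) (by simpa [hsp] using ha)
      | cons q rest' =>
          rw [PySem.Chars.join_cons_cons, PySem.Chars.join_cons_cons]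
          rw [List.filter_append, List.filter_append]
          rw [List.filter_eq_self.mpr (by
            intro a ha
            simpa using fun hsp => h p (by simp) (by simpa [hsp] using ha))]
          rw [ih (by intro p' hp'; exact h p' (List.mem_cons_of_mem _ hp'))]
          rfl

-- the formatted piece of A in terms of a ","-join
theorem piece_eq (xs : List Int) :
    PySem.Chars.replace (pyStrIntList xs) " ".toList "".toList
      = '[' :: (PySem.Chars.join ",".toList (xs.map PySem.Int.toChars) ++ [']']) := by
  have hsp : (" ".toList : List Char) = [' '] := rfl
  have hnl : ("".toList : List Char) = [] := rfl
  rw [hsp, hnl, replace_space]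
  unfold pyStrIntList
  rw [List.filter_cons_of_pos (by decide), List.filter_append]
  rw [filter_join _ (by
    intro p hp
    rcases List.mem_map.mp hp with ⟨m, _, rfl⟩
    exact space_not_mem_toChars m)]
  rfl

-- A's inner counter loop builds exactly the arithmetic range
theorem inner_eq (n : Nat) : ∀ (c : Int) (l : List Int),
    (List.range n).foldl (fun (st2 : Int × List Int) _ => (st2.1 + 1, st2.2 ++ [st2.1])) (c, l)
      = (c + n, l ++ PySem.List.pyRange c (c + n)) := by
  induction n with
  | zero =>
      intro c l
      simp [PySem.List.pyRange_one_eq_nil le_rfl]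
  | succ n ih =>
      intro c l
      rw [List.range_succ, List.foldl_append, ih]
      have h1 : (c : Int) ≤ c + n := by omega
      have h2 : c + (n : Int) + 1 = c + ((n + 1 : Nat) : Int) := by push_cast; ring
      simp only [List.foldl_cons, List.foldl_nil]
      rw [← h2, PySem.List.pyRange_one_succ_right h1]
      simp

-- word bodies: fmt = indices of a word when it starts a bracket, fmtF = continuation with commas
def fmtF : Int → List Char → List Char
  | _, [] => []
  | c, _ :: w => ',' :: (PySem.Int.toChars c ++ fmtF (c + 1) w)
def fmt : Int → List Char → List Char
  | _, [] => []
  | c, _ :: w => PySem.Int.toChars c ++ fmtF (c + 1) w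

theorem fmt_eq_join (w : List Char) : ∀ c : Int,
    PySem.Chars.join [','] ((PySem.List.pyRange c (c + w.length)).map PySem.Int.toChars)
      = fmt c w := by
  induction w with
  | nil =>
      intro c
      simp [PySem.List.pyRange_one_eq_nil le_rfl, PySem.Chars.join_nil, fmt]
  | cons x t ih =>
      intro c
      have hcast : c + ((t.length + 1 : Nat) : Int) = (c + 1) + t.length := by push_cast; ring
      rw [List.length_cons, hcast,
        PySem.List.pyRange_one_cons (by omega : c < (c + 1) + (t.length : Int))]
      cases t with
      | nil =>
          simp only [List.length_nil, Nat.cast_zero, add_zero,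
            PySem.List.pyRange_one_eq_nil le_rfl, List.map_cons, List.map_nil]
          rw [PySem.Chars.join_singleton]
          simp [fmt, fmtF]
      | cons y t' =>
          have hlt : (c + 1) < (c + 1) + ((y :: t').length : Int) := by
            simp only [List.length_cons]; push_cast; omega
          have hr := PySem.List.pyRange_one_cons hlt
          rw [List.map_cons, hr, List.map_cons, PySem.Chars.join_cons_cons,
            ← List.map_cons, ← hr, ih (c + 1)]
          simp [fmt, fmtF]

-- A's piece, as a function of the offset and the word
def pieceOf (c : Int) (w : List Char) : List Char :=
  '[' :: (fmt c w ++ [']'])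

def piecesA : Int → List (List Char) → List (List Char)
  | _, [] => []
  | c, w :: ws => pieceOf c w :: piecesA (c + w.length) ws

theorem stepA_eq (c : Int) (ps : List (List Char)) (w : List Char) :
    transferStepA (c, ps) w = (c + w.length, ps ++ [pieceOf c w]) := by
  unfold transferStepA
  rw [inner_eq w.length c []]
  simp only [List.nil_append]
  rw [piece_eq]
  have : (",".toList : List Char) = [','] := rfl
  rw [this, fmt_eq_join]
  rfl

theorem foldA_eq (ws : List (List Char)) : ∀ (c : Int) (ps : List (List Char)),
    ws.foldl transferStepA (c, ps)
      = (c + (((ws.map List.length).sum : Nat) : Int), ps ++ piecesA c ws) := by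
  induction ws with
  | nil => intro c ps; simp [piecesA]
  | cons w ws ih =>
      intro c ps
      rw [List.foldl_cons, stepA_eq, ih]
      simp [piecesA, List.append_assoc]
      push_cast
      ring

-- B's emitted text, word-structured
def bodyW : Int → List (List Char) → List Char
  | _, [] => []
  | c, [w] => fmt c w
  | c, w :: ws => fmt c w ++ "] [".toList ++ bodyW (c + w.length) ws
def bodyF : Int → List (List Char) → List Char
  | _, [] => []
  | c, [w] => fmtF c w
  | c, w :: ws => fmtF c w ++ "] [".toList ++ bodyW (c + w.length) ws

-- B's char fold, characterized over sp
theorem foldB_eq (s : List Char) : ∀ (flag : Bool) (c : Int) (out : List Char),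
    (s.foldl transferStepB (c, flag, out)).2.2
      = out ++ (if flag then bodyW c (sp s) else bodyF c (sp s)) := by
  induction s with
  | nil =>
      intro flag c out
      cases flag <;> simp [sp, bodyW, bodyF, fmt, fmtF]
  | cons ch t ih =>
      intro flag c out
      rw [List.foldl_cons]
      have hne := sp_ne_nil t
      by_cases hc : ch = ' '
      · subst hc
        simp only [transferStepB, if_pos rfl]
        rw [ih]
        cases hsp : sp t with
        | nil => exact absurd hsp hne
        | cons w' ws' =>
            cases flag <;>
              cases ws' <;>
                simp [sp, hsp, bodyW, bodyF, fmt, fmtF, List.append_assoc]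
      · simp only [transferStepB, if_neg hc]
        rw [ih]
        cases hsp : sp t with
        | nil => exact absurd hsp hne
        | cons w' ws' =>
            have hoff : ∀ k : Nat, c + ((k + 1 : Nat) : Int) = c + 1 + k := by
              intro k; push_cast; ring
            cases flag <;>
              cases ws' <;>
                simp [sp, hsp, hc, bodyW, bodyF, fmt, fmtF, List.append_assoc, hoff] <;>
                  (congr 1; ring)

-- joining A's pieces gives B's bracket stream
theorem join_pieces (ws : List (List Char)) (hne : ws ≠ []) : ∀ c : Int,
    PySem.Chars.join [' '] (piecesA c ws) = '[' :: (bodyW c ws ++ [']']) := by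
  induction ws with
  | nil => exact absurd rfl hne
  | cons w ws ih =>
      intro c
      cases ws with
      | nil =>
          simp only [piecesA]
          rw [PySem.Chars.join_singleton]
          simp [pieceOf, bodyW]
      | cons w2 ws2 =>
          have hcons : piecesA c (w :: w2 :: ws2)
              = pieceOf c w :: piecesA (c + w.length) (w2 :: ws2) := by
            simp [piecesA]
          rw [hcons, show piecesA (c + (w.length : Int)) (w2 :: ws2)
              = pieceOf (c + (w.length : Int)) w2
                :: piecesA (c + (w.length : Int) + (w2.length : Int)) ws2 from by simp [piecesA],
            PySem.Chars.join_cons_cons,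
            show pieceOf (c + (w.length : Int)) w2
                :: piecesA (c + (w.length : Int) + (w2.length : Int)) ws2
              = piecesA (c + (w.length : Int)) (w2 :: ws2) from by simp [piecesA],
            ih (by simp)]
          simp [pieceOf, bodyW, List.append_assoc]

-- ===== VERDICT (by name: the statement is the Claim_ definition above) =====
theorem transfer_spec : Claim_equal_transfer := by
  intro raw_sen _
  unfold Spec_transfer transfer transfer_alt
  have h1 : (" ".toList : List Char) = [' '] := rfl
  simp only [h1, splitOn_eq_sp]
  rw [foldA_eq, foldB_eq]
  simp only [List.nil_append, if_pos rfl]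
  rw [join_pieces _ (sp_ne_nil _)]
  simp [if_true]
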